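-- pv_equiv track=rewrite | github.com/miladkeivanfar/tld-validate | tld_validate.py | validate_domains
-- ===== SOURCE A (Python) =====
-- def validate_domains(domains, valid_tlds, exclude=""):
--     valid_domains = []
--     invalid_domains = []
--     exclude_tld = exclude
--     valid_tlds_set = set(valid_tlds)
--     for domain in domains:
--         if any(domain.endswith(tld) for tld in valid_tlds_set):
--             if exclude_tld != None:
--                 if domain.endswith(exclude_tld):
--                     invalid_domains.append(domain)
--                 else:
--                     valid_domains.append(domain)
--             else:
--                 valid_domains.append(domain)
--         else:
--             invalid_domains.append(domain)
--     return valid_domains, invalid_domains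
-- ===== SOURCE B (Python) =====
-- def validate_domains(domains, valid_tlds, exclude=""):
--     # hash-set of TLDs; per domain test each of its suffixes for membership,
--     # instead of scanning every TLD per domain
--     tlds = set(valid_tlds)
--     valid, invalid = [], []
--     for d in domains:
--         n = len(d)
--         matched = any(d[n - k:] in tlds for k in range(n + 1))
--         if matched and (exclude is None or not d.endswith(exclude)):
--             valid.append(d)
--         else:
--             invalid.append(d)
--     return valid, invalid
-- ===== Notes on version B (the rewrite author's own statement) =====
-- stated objective: faster
-- what changed: Instead of testing every TLD with endswith per domain (O(T*L) per domain), B builds a hash set of the TLDs once and probes each suffix of the domain for membership (O(L) hash probes per domain), keeping the same exclude/endswith classification.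
import Mathlib
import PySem

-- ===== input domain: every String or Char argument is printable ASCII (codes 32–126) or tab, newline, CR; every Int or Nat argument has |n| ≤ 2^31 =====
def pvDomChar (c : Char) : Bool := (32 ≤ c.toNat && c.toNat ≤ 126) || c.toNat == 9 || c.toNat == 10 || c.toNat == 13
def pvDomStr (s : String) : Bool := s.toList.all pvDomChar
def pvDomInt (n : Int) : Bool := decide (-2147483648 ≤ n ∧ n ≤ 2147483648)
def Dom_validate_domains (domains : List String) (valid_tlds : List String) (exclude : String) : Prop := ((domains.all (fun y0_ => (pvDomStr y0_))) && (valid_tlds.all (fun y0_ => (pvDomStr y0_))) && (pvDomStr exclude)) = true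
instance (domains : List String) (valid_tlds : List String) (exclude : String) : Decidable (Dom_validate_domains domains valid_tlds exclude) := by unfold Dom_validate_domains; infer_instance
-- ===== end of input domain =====

-- B replaces A's per-domain scan over all TLDs (endswith each) by a hash-set of TLDs
-- probed once per suffix of the domain; objective: faster on large TLD lists.


-- ===== PORT A =====
-- literal port of A: set of TLDs, then for each domain 'any(domain.endswith(tld) …)';
-- 'exclude_tld != None' is always true here (exclude : String), so that branch is taken.
def validate_domains (domains : List String) (valid_tlds : List String) (exclude : String) : List String × List String :=
  let valid_tlds_set : PySem.Set String := PySem.Set.ofList valid_tlds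
  domains.foldl
    (fun acc domain =>
      if valid_tlds_set.any (fun tld => PySem.Str.endswith domain tld) then
        if PySem.Str.endswith domain exclude then (acc.1, acc.2 ++ [domain])
        else (acc.1 ++ [domain], acc.2)
      else (acc.1, acc.2 ++ [domain]))
    ([], [])

-- ===== PORT B =====
-- port of Source B: membership of each suffix d[n-k:] in the TLD set; 'exclude is None' is
-- always false here (exclude : String), so the guard is just 'not d.endswith(exclude)'.
def validate_domains_alt (domains : List String) (valid_tlds : List String) (exclude : String) : List String × List String :=
  let tlds : PySem.Set String := PySem.Set.ofList valid_tlds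
  domains.foldl
    (fun acc d =>
      let n := PySem.Str.len d
      let matched := (PySem.List.pyRange 0 (n + 1) 1).any
        (fun k => PySem.Set.contains tlds (PySem.Str.slice d (some (n - k)) none))
      if matched && !(PySem.Str.endswith d exclude) then (acc.1 ++ [d], acc.2)
      else (acc.1, acc.2 ++ [d]))
    ([], [])

-- ===== PRECONDITION & SPEC =====
def Spec_validate_domains (domains : List String) (valid_tlds : List String) (exclude : String) (out : List String × List String) : Prop := out = validate_domains_alt domains valid_tlds exclude
instance (domains : List String) (valid_tlds : List String) (exclude : String) (out : List String × List String) : Decidable (Spec_validate_domains domains valid_tlds exclude out) := by unfold Spec_validate_domains; infer_instance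

-- ===== CLAIM (what is proved, stated in full; the proofs are below) =====
def Claim_equal_validate_domains : Prop := ∀ (domains : List String) (valid_tlds : List String) (exclude : String), Dom_validate_domains domains valid_tlds exclude → Spec_validate_domains domains valid_tlds exclude (validate_domains domains valid_tlds exclude)

-- ===== LEMMAS AND PROOFS =====

-- A's match test (some TLD is a suffix of d) equals B's (some suffix of d is in the TLD set).
theorem matched_eq (d : String) (valid_tlds : List String) :
    (PySem.Set.ofList valid_tlds).any (fun tld => PySem.Str.endswith d tld)
    = (PySem.List.pyRange 0 (PySem.Str.len d + 1) 1).any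
        (fun k => PySem.Set.contains (PySem.Set.ofList valid_tlds) (PySem.Str.slice d (some (PySem.Str.len d - k)) none)) := by
  rcases Bool.eq_false_or_eq_true ((PySem.Set.ofList valid_tlds).any (fun tld => PySem.Str.endswith d tld)) with h | h <;> rw [h] <;> symm
  · -- some TLD t is a suffix of d: k = len t witnesses B's any
    rw [List.any_eq_true] at h ⊢
    obtain ⟨t, ht, hend⟩ := h
    have htl : t.toList <:+ d.toList := by
      simpa [pysem, PySem.Chars.endswith_iff] using hend
    have hlen : t.length ≤ d.length := by
      simpa [String.length_toList] using htl.length_le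
    refine ⟨(t.length : Int), ?_, ?_⟩
    · rw [PySem.List.mem_pyRange_one]
      refine ⟨Int.natCast_nonneg _, ?_⟩
      simp [pysem]; omega
    · obtain ⟨p, hp⟩ := htl
      have hplen : p.length = d.length - t.length := by
        have := congrArg List.length hp
        simp [String.length_toList] at this; omega
      have hdrop : d.toList.drop (d.length - t.length) = t.toList := by
        rw [← hplen, ← hp]; exact List.drop_left
      have hnn : (0:Int) ≤ PySem.Str.len d - (t.length : Int) := by simp [pysem]; omega
      have hs : PySem.Str.slice d (some (PySem.Str.len d - (t.length : Int))) none = t := by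
        apply String.toList_inj.mp
        have h1 : (PySem.Str.slice d (some (PySem.Str.len d - (t.length : Int))) none).toList
            = d.toList.drop (PySem.Str.len d - (t.length : Int)).toNat := by
          rw [PySem.Str.toList_slice, PySem.Chars.slice_eq_listSlice, PySem.List.slice_from _ hnn]
        have h2 : (PySem.Str.len d - (t.length : Int)).toNat = d.length - t.length := by
          simp [pysem]
        rw [h1, h2, hdrop]
      rw [hs]
      simpa [pysem] using ht
  · -- no TLD is a suffix of d: no suffix of d is in the set
    rw [List.any_eq_false] at h ⊢
    intro k hk
    rw [PySem.List.mem_pyRange_one] at hk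
    simp only [Bool.not_eq_true]
    rcases Bool.eq_false_or_eq_true (PySem.Set.contains (PySem.Set.ofList valid_tlds)
      (PySem.Str.slice d (some (PySem.Str.len d - k)) none)) with hc | hc
    · exfalso
      have hmem : PySem.Str.slice d (some (PySem.Str.len d - k)) none ∈ valid_tlds := by
        simpa [pysem] using hc
      apply h _ (by simpa [pysem] using hmem)
      have hnn : (0:Int) ≤ PySem.Str.len d - k := by simp [pysem] at hk ⊢; omega
      simp only [PySem.Str.endswith_eq, PySem.Chars.endswith_iff]
      have hsl : (PySem.Str.slice d (some (PySem.Str.len d - k)) none).toList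
          = d.toList.drop (PySem.Str.len d - k).toNat := by
        rw [PySem.Str.toList_slice, PySem.Chars.slice_eq_listSlice, PySem.List.slice_from _ hnn]
      rw [show ((d.length : Int)) = PySem.Str.len d by simp [pysem], hsl]
      exact List.drop_suffix _ _
    · exact hc

-- the two per-domain step functions coincide
theorem step_eq (valid_tlds : List String) (exclude : String) :
    (fun (acc : List String × List String) domain =>
      if (PySem.Set.ofList valid_tlds).any (fun tld => PySem.Str.endswith domain tld) then
        if PySem.Str.endswith domain exclude then (acc.1, acc.2 ++ [domain])
        else (acc.1 ++ [domain], acc.2)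
      else (acc.1, acc.2 ++ [domain]))
    = (fun (acc : List String × List String) d =>
      let n := PySem.Str.len d
      let matched := (PySem.List.pyRange 0 (n + 1) 1).any
        (fun k => PySem.Set.contains (PySem.Set.ofList valid_tlds) (PySem.Str.slice d (some (n - k)) none))
      if matched && !(PySem.Str.endswith d exclude) then (acc.1 ++ [d], acc.2)
      else (acc.1, acc.2 ++ [d])) := by
  funext acc d
  simp only [← matched_eq d valid_tlds]
  rcases Bool.eq_false_or_eq_true ((PySem.Set.ofList valid_tlds).any (fun tld => PySem.Str.endswith d tld)) with h | h <;>
    rcases Bool.eq_false_or_eq_true (PySem.Str.endswith d exclude) with h2 | h2 <;>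
    simp only [h, h2, Bool.not_true, Bool.not_false, Bool.and_true, Bool.and_false] <;> simp

-- ===== VERDICT (by name: the statement is the Claim_ definition above) =====
theorem validate_domains_spec : Claim_equal_validate_domains := by
  intro domains valid_tlds exclude _
  show validate_domains domains valid_tlds exclude = validate_domains_alt domains valid_tlds exclude
  exact congrArg (fun f => List.foldl f (([], []) : List String × List String) domains)
    (step_eq valid_tlds exclude)
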